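-- pv_equiv track=rewrite | github.com/pypi-data/pypi-mirror-2 | packages/binstr/binstr-1.1.tar.gz/binstr-1.1/binstr.py | b_nand
-- ===== SOURCE A (Python) =====
-- def b_nand(A='00000000', B='00000000', align='right'): #{{{
--     '''
--     Perform a bitwise NAND on two strings of binary digits, A and B.
--     The align argument can be used to align the shortest of A and B to one
--       side of the other.
--     The returned string is the same length as the longest input.
--     E.g. b_and('0101', '0011') returns '1110'
--          b_and('01010000', '0011') returns '11111111'
--          b_and('01010000', '0011', align='left') returns '11101111'
--     '''
--     assert type(A) is str, 'A is not a string: %s' % str(A)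
--     assert type(B) is str, 'B is not a string: %s' % str(B)
--     assert type(align) is str, 'align is not a string: %s' % str(align)
--
--     assert len(A) >= 1, 'A has no digits'
--     assert len(B) >= 1, 'B has no digits'
--     assert align == 'right' or align == 'left', 'Invalid align: "%s". Use either "right" or "left"' % align
--
--     from re import compile as re_compile
--     pattern = re_compile('[^01]')
--     assert bool(pattern.search(A)) == False, 'Invalid A: "%s". Must only contain "0"s or "1"s.' % A
--     assert bool(pattern.search(B)) == False, 'Invalid B: "%s". Must only contain "0"s or "1"s.' % B
--     del re_compile, pattern
--
--     if len(A) >= len(B): (p, q) = (A, B)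
--     else:                (p, q) = (B, A)
--     del A, B
--
--     if align == 'right': q = '0'*(len(p) - len(q)) + q
--     else:                q = q + '0'*(len(p) - len(q))
--     assert len(p) == len(q), 'Error in this function! len(p) must equal len(q). Oh dear.'
--
--     return ''.join([str(int( not( bool(int(a)) and bool(int(b)) ) )) for (a, b) in zip(p, q)])
-- ===== SOURCE B (Python) =====
-- def b_nand(A='00000000', B='00000000', align='right'):
--     assert type(A) is str, 'A is not a string: %s' % str(A)
--     assert type(B) is str, 'B is not a string: %s' % str(B)
--     assert type(align) is str, 'align is not a string: %s' % str(align)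
--     assert len(A) >= 1, 'A has no digits'
--     assert len(B) >= 1, 'B has no digits'
--     assert align == 'right' or align == 'left', 'Invalid align: "%s". Use either "right" or "left"' % align
--     assert set(A) <= {'0', '1'}, 'Invalid A: "%s". Must only contain "0"s or "1"s.' % A
--     assert set(B) <= {'0', '1'}, 'Invalid B: "%s". Must only contain "0"s or "1"s.' % B
--     if len(A) >= len(B):
--         p, q = A, B
--     else:
--         p, q = B, A
--     if align == 'right':
--         q = '0' * (len(p) - len(q)) + q
--     else:
--         q = q + '0' * (len(p) - len(q))
--     n = len(p)
--     r = (int(p, 2) & int(q, 2)) ^ ((1 << n) - 1)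
--     return bin(r)[2:].zfill(n)
-- ===== Notes on version B (the rewrite author's own statement) =====
-- stated objective: alternative
-- what changed: A joins per-character NAND results over the zipped padded strings; B parses both padded strings as big integers with int(.,2), computes (p & q) ^ ((1<<n)-1) in one bitwise operation, and formats back with bin()[2:].zfill(n).
import Mathlib
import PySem

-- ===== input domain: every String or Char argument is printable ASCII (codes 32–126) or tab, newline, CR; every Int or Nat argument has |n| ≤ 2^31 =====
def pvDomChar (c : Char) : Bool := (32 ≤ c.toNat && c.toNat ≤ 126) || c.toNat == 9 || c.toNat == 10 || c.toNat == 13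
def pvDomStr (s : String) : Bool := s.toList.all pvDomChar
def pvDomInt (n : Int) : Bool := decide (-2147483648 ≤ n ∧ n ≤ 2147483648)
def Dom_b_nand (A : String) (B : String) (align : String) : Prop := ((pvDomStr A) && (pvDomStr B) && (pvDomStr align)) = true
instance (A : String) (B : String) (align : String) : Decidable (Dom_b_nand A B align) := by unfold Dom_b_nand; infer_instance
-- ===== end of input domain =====

-- B replaces A's per-character join over the zipped padded strings by one big-integer
-- computation: parse both padded strings as binary numbers, NAND them as (land then xor
-- with the all-ones mask), and format the result back with zfill (objective: alternative).

-- ===== PORT A =====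
-- str(int(not(bool(int(a)) and bool(int(b))))) for binary digit chars (exact on '0'/'1'; Pre_ excludes others, where int() raises)
def nandChar (x : Char) (y : Char) : Char := if x == '1' && y == '1' then '0' else '1'

def b_nand (A : String) (B : String) (align : String) : String :=
  let a := A.toList
  let b := B.toList
  let pq := if b.length ≤ a.length then (a, b) else (b, a)
  let p := pq.1
  let q := if align = "right" then List.replicate (p.length - pq.2.length) '0' ++ pq.2
           else pq.2 ++ List.replicate (p.length - pq.2.length) '0'
  String.mk ((p.zip q).map (fun cd => nandChar cd.1 cd.2))

-- ===== PORT B =====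
-- int(s, 2) for a binary string (exact on '0'/'1' strings; values are nonnegative, so Nat)
def bitOf (c : Char) : Nat := if c == '1' then 1 else 0
def parseBin (l : List Char) : Nat := l.foldl (fun acc c => 2 * acc + bitOf c) 0
-- bin(m) without the '0b' prefix, for m > 0 (digits most-significant first)
def binAux (m : Nat) : List Char :=
  if h : m = 0 then []
  else binAux (m / 2) ++ [if m % 2 = 1 then '1' else '0']
  decreasing_by exact Nat.div_lt_self (Nat.pos_of_ne_zero h) one_lt_two
-- bin(m)[2:]  (bin(0) = '0b0')
def binRep (m : Nat) : List Char := if m = 0 then ['0'] else binAux m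
-- str.zfill(n)
def zfill (n : Nat) (l : List Char) : List Char := List.replicate (n - l.length) '0' ++ l

def b_nand_alt (A : String) (B : String) (align : String) : String :=
  let a := A.toList
  let b := B.toList
  let pq := if b.length ≤ a.length then (a, b) else (b, a)
  let p := pq.1
  let q := if align = "right" then List.replicate (p.length - pq.2.length) '0' ++ pq.2
           else pq.2 ++ List.replicate (p.length - pq.2.length) '0'
  let n := p.length
  let r := (parseBin p &&& parseBin q) ^^^ ((1 <<< n) - 1)
  String.mk (zfill n (binRep r))

-- ===== PRECONDITION & SPEC =====
-- Pre_ is exactly A's asserts: both strings nonempty and purely '0'/'1', align "right" or "left" (A raises AssertionError otherwise).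
def Pre_b_nand (A : String) (B : String) (align : String) : Prop :=
  1 ≤ A.toList.length ∧ 1 ≤ B.toList.length ∧ (align = "right" ∨ align = "left") ∧
  A.toList.all (fun c => c == '0' || c == '1') = true ∧
  B.toList.all (fun c => c == '0' || c == '1') = true
instance (A : String) (B : String) (align : String) : Decidable (Pre_b_nand A B align) := by
  unfold Pre_b_nand; infer_instance

def pvWitness_b_nand : String × String × String := ("01", "1", "right")

def Spec_b_nand (A : String) (B : String) (align : String) (out : String) : Prop := out = b_nand_alt A B align
instance (A : String) (B : String) (align : String) (out : String) : Decidable (Spec_b_nand A B align out) := by unfold Spec_b_nand; infer_instance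

-- ===== CLAIM (what is proved, stated in full; the proofs are below) =====
def Claim_equal_b_nand : Prop := ∀ (A : String) (B : String) (align : String), Dom_b_nand A B align → Pre_b_nand A B align → Spec_b_nand A B align (b_nand A B align)

-- ===== LEMMAS AND PROOFS =====

theorem parse_acc (l : List Char) : ∀ a : Nat,
    l.foldl (fun acc c => 2 * acc + bitOf c) a = a * 2 ^ l.length + parseBin l := by
  induction l with
  | nil => intro a; simp [parseBin]
  | cons c t ih =>
    intro a
    simp only [List.foldl_cons, List.length_cons, parseBin] at *
    rw [ih (2 * a + bitOf c), ih (2 * 0 + bitOf c)]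
    ring

theorem parseBin_cons (c : Char) (t : List Char) :
    parseBin (c :: t) = bitOf c * 2 ^ t.length + parseBin t := by
  simp only [parseBin, List.foldl_cons]
  rw [parse_acc]
  show (2 * 0 + bitOf c) * 2 ^ t.length + parseBin t = _
  rw [show 2 * 0 + bitOf c = bitOf c by omega]
  rfl

theorem bitOf_le (c : Char) : bitOf c ≤ 1 := by
  unfold bitOf; split <;> omega

theorem parseBin_lt (l : List Char) : parseBin l < 2 ^ l.length := by
  induction l with
  | nil => simp [parseBin]
  | cons c t ih =>
    rw [parseBin_cons]
    have hb := bitOf_le c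
    have h2 : bitOf c * 2 ^ t.length ≤ 1 * 2 ^ t.length :=
      Nat.mul_le_mul_right _ hb
    simp only [List.length_cons, pow_succ]
    omega

theorem land_split (b1 b2 x y k : Nat) (hx : x < 2 ^ k) (hy : y < 2 ^ k) :
    (b1 * 2 ^ k + x) &&& (b2 * 2 ^ k + y) = (b1 &&& b2) * 2 ^ k + (x &&& y) := by
  have hxy : x &&& y < 2 ^ k := Nat.and_lt_two_pow x hy
  apply Nat.eq_of_testBit_eq
  intro i
  rw [Nat.testBit_land, mul_comm b1, mul_comm b2, mul_comm (b1 &&& b2),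
      Nat.testBit_two_pow_mul_add _ hx, Nat.testBit_two_pow_mul_add _ hy,
      Nat.testBit_two_pow_mul_add _ hxy]
  by_cases h : i < k <;> simp [h, Nat.testBit_land]

theorem xor_split (b1 b2 x y k : Nat) (hx : x < 2 ^ k) (hy : y < 2 ^ k) :
    (b1 * 2 ^ k + x) ^^^ (b2 * 2 ^ k + y) = (b1 ^^^ b2) * 2 ^ k + (x ^^^ y) := by
  have hxy : x ^^^ y < 2 ^ k := Nat.xor_lt_two_pow hx hy
  apply Nat.eq_of_testBit_eq
  intro i
  rw [Nat.testBit_xor, mul_comm b1, mul_comm b2, mul_comm (b1 ^^^ b2),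
      Nat.testBit_two_pow_mul_add _ hx, Nat.testBit_two_pow_mul_add _ hy,
      Nat.testBit_two_pow_mul_add _ hxy]
  by_cases h : i < k <;> simp [h, Nat.testBit_xor]

theorem bitOf_nand (a b : Char) : bitOf (nandChar a b) = (bitOf a &&& bitOf b) ^^^ 1 := by
  by_cases ha : a == '1' <;> by_cases hb : b == '1' <;> simp [nandChar, bitOf, ha, hb]

theorem nand_val (p : List Char) : ∀ q : List Char, q.length = p.length →
    parseBin ((p.zip q).map (fun cd => nandChar cd.1 cd.2)) =
      (parseBin p &&& parseBin q) ^^^ (2 ^ p.length - 1) := by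
  induction p with
  | nil =>
    intro q hq
    rw [List.length_eq_zero_iff.1 hq]
    simp [parseBin]
  | cons a p' ih =>
    intro q hq
    match q with
    | [] => simp at hq
    | b :: q' =>
      simp only [List.length_cons] at hq
      have hlen : q'.length = p'.length := by omega
      have hmaplen : ((p'.zip q').map (fun cd => nandChar cd.1 cd.2)).length = p'.length := by
        simp [List.length_zip, hlen]
      have hx : parseBin p' < 2 ^ p'.length := parseBin_lt p'
      have hy : parseBin q' < 2 ^ p'.length := by
        have := parseBin_lt q'; rwa [hlen] at this
      have hxy : parseBin p' &&& parseBin q' < 2 ^ p'.length := Nat.and_lt_two_pow _ hy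
      have hones : (2 : Nat) ^ p'.length - 1 < 2 ^ p'.length := by
        have := pow_pos (by norm_num : (0:ℕ) < 2) p'.length; omega
      have htop : (2 : Nat) ^ (p'.length + 1) - 1 = 1 * 2 ^ p'.length + (2 ^ p'.length - 1) := by
        have := pow_pos (by norm_num : (0:ℕ) < 2) p'.length
        rw [pow_succ]; omega
      calc parseBin (((a :: p').zip (b :: q')).map (fun cd => nandChar cd.1 cd.2))
          = bitOf (nandChar a b) * 2 ^ p'.length +
              parseBin ((p'.zip q').map (fun cd => nandChar cd.1 cd.2)) := by
            rw [List.zip_cons_cons, List.map_cons, parseBin_cons, hmaplen]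
        _ = ((bitOf a &&& bitOf b) ^^^ 1) * 2 ^ p'.length +
              ((parseBin p' &&& parseBin q') ^^^ (2 ^ p'.length - 1)) := by
            rw [ih q' hlen, bitOf_nand]
        _ = ((bitOf a * 2 ^ p'.length + parseBin p') &&& (bitOf b * 2 ^ p'.length + parseBin q'))
              ^^^ (2 ^ (p'.length + 1) - 1) := by
            rw [land_split _ _ _ _ _ hx hy, htop, xor_split _ _ _ _ _ hxy hones]
        _ = (parseBin (a :: p') &&& parseBin (b :: q')) ^^^ (2 ^ (a :: p').length - 1) := by
            rw [parseBin_cons, parseBin_cons, hlen]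
            simp [List.length_cons]

-- strip leading zeros (proof-only helper)
def sz : List Char → List Char
  | [] => []
  | c :: t => if c = '0' then sz t else c :: t

theorem sz_append_nil (l m : List Char) (h : sz l = []) : sz (l ++ m) = sz m := by
  induction l with
  | nil => simp
  | cons c t ih =>
    by_cases hc : c = '0'
    · simp only [hc, List.cons_append] at h ⊢
      simp only [sz, if_pos rfl] at h ⊢
      exact ih h
    · simp [sz, hc] at h

theorem sz_append_ne (l m : List Char) (h : sz l ≠ []) : sz (l ++ m) = sz l ++ m := by
  induction l with
  | nil => simp [sz] at h
  | cons c t ih =>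
    by_cases hc : c = '0'
    · simp only [hc, List.cons_append] at h ⊢
      simp only [sz, if_pos rfl] at h ⊢
      exact ih h
    · simp [sz, hc]

theorem sz_len_le (l : List Char) : (sz l).length ≤ l.length := by
  induction l with
  | nil => simp [sz]
  | cons c t ih =>
    simp only [sz]
    split
    · simp only [List.length_cons]; omega
    · simp

theorem sz_nil_iff (l : List Char) (hb : ∀ c ∈ l, c = '0' ∨ c = '1') :
    parseBin l = 0 ↔ sz l = [] := by
  induction l with
  | nil => simp [parseBin, sz]
  | cons c t ih =>
    have hbt : ∀ c ∈ t, c = '0' ∨ c = '1' := fun x hx => hb x (List.mem_cons_of_mem _ hx)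
    have hc := hb c List.mem_cons_self
    rw [parseBin_cons]
    have hp := pow_pos (by norm_num : (0:ℕ) < 2) t.length
    rcases hc with hc | hc <;> subst hc
    · simpa [sz, bitOf] using ih hbt
    · simp [sz, bitOf]

theorem sz_replicate (l : List Char) :
    List.replicate (l.length - (sz l).length) '0' ++ sz l = l := by
  induction l with
  | nil => simp [sz]
  | cons c t ih =>
    by_cases hc : c = '0'
    · have h := sz_len_le t
      rw [show sz (c :: t) = sz t from by simp [sz, hc], List.length_cons,
          show t.length + 1 - (sz t).length = (t.length - (sz t).length) + 1 by omega,
          List.replicate_succ, List.cons_append, ih, hc]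
    · simp [sz, hc]

theorem sz_nil_replicate (l : List Char) (h : sz l = []) : l = List.replicate l.length '0' := by
  have := sz_replicate l
  rw [h] at this
  simp at this
  conv_lhs => rw [← this]

theorem binAux_sz (l : List Char) (hb : ∀ c ∈ l, c = '0' ∨ c = '1') :
    binAux (parseBin l) = sz l := by
  induction l using List.reverseRecOn with
  | nil => simp [parseBin, sz, binAux]
  | append_singleton t c ih =>
    have hbt : ∀ x ∈ t, x = '0' ∨ x = '1' := fun x hx => hb x (by simp [hx])
    have hc : c = '0' ∨ c = '1' := hb c (by simp)
    have hparse : parseBin (t ++ [c]) = 2 * parseBin t + bitOf c := by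
      simp [parseBin, List.foldl_append]
    have hbit : bitOf c ≤ 1 := bitOf_le c
    by_cases hm : parseBin (t ++ [c]) = 0
    · -- value 0: all zeros
      have hv : parseBin t = 0 ∧ bitOf c = 0 := by omega
      have hc0 : c = '0' := by
        rcases hc with h | h
        · exact h
        · subst h; simp [bitOf] at hv
      have hszt : sz t = [] := (sz_nil_iff t hbt).1 hv.1
      rw [hm]
      rw [show binAux 0 = [] by rw [binAux]; simp]
      rw [sz_append_nil t [c] hszt, hc0]
      simp [sz]
    · rw [binAux]
      simp only [hm, dif_neg, not_false_iff]
      have hdiv : parseBin (t ++ [c]) / 2 = parseBin t := by omega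
      have hmod : parseBin (t ++ [c]) % 2 = bitOf c := by omega
      have hdig : (if parseBin (t ++ [c]) % 2 = 1 then '1' else '0') = c := by
        rw [hmod]
        rcases hc with h | h <;> subst h <;> simp [bitOf]
      rw [hdiv, hdig]
      by_cases hv : parseBin t = 0
      · have hszt : sz t = [] := (sz_nil_iff t hbt).1 hv
        rw [hv, show binAux 0 = [] by rw [binAux]; simp]
        have hc1 : c = '1' := by
          rcases hc with h | h
          · subst h; simp [bitOf] at hparse; omega
          · exact h
        rw [List.nil_append, sz_append_nil t [c] hszt, hc1]
        simp [sz]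
      · have hszt : sz t ≠ [] := fun h => hv ((sz_nil_iff t hbt).2 h)
        rw [ih hbt, sz_append_ne t [c] hszt]

theorem zfill_bin (l : List Char) (hb : ∀ c ∈ l, c = '0' ∨ c = '1') (hne : l ≠ []) :
    zfill l.length (binRep (parseBin l)) = l := by
  unfold binRep
  by_cases h0 : parseBin l = 0
  · have hszl : sz l = [] := (sz_nil_iff l hb).1 h0
    have hrep := sz_nil_replicate l hszl
    have hlen : 1 ≤ l.length := by
      cases l with
      | nil => exact absurd rfl hne
      | cons a t => simp
    have hz : zfill l.length ['0'] = List.replicate (l.length - 1) '0' ++ ['0'] := by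
      simp [zfill]
    rw [if_pos h0, hz, ← List.replicate_succ',
        show l.length - 1 + 1 = l.length by omega]
    exact hrep.symm
  · rw [if_neg h0, binAux_sz l hb]
    unfold zfill
    exact sz_replicate l

theorem main_key (p q : List Char) (hq : q.length = p.length) (hp : p ≠ []) :
    (p.zip q).map (fun cd => nandChar cd.1 cd.2) =
      zfill p.length (binRep ((parseBin p &&& parseBin q) ^^^ ((1 <<< p.length) - 1))) := by
  set L := (p.zip q).map (fun cd => nandChar cd.1 cd.2) with hL
  have hLlen : L.length = p.length := by simp [hL, List.length_zip, hq]
  have hLb : ∀ c ∈ L, c = '0' ∨ c = '1' := by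
    intro c hc
    obtain ⟨x, _, rfl⟩ := List.mem_map.1 hc
    unfold nandChar; split <;> simp
  have hLne : L ≠ [] := by
    intro h
    apply hp
    rw [h] at hLlen
    simpa using (List.length_eq_zero_iff.1 hLlen.symm)
  have hval : parseBin L = (parseBin p &&& parseBin q) ^^^ (2 ^ p.length - 1) :=
    nand_val p q hq
  rw [Nat.one_shiftLeft, ← hval, ← hLlen, zfill_bin L hLb hLne]

theorem b_nand_spec_aux (A B align : String)
    (hA1 : 1 ≤ A.toList.length) (hB1 : 1 ≤ B.toList.length) :
    b_nand A B align = b_nand_alt A B align := by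
  unfold b_nand b_nand_alt
  simp only
  set a := A.toList
  set b := B.toList
  by_cases h1 : b.length ≤ a.length
  · simp only [if_pos h1]
    by_cases h2 : align = "right"
    · simp only [if_pos h2]
      exact congrArg String.mk (main_key _ _
        (by simp only [List.length_append, List.length_replicate]; omega)
        (by intro h; rw [h] at hA1; simp at hA1))
    · simp only [if_neg h2]
      exact congrArg String.mk (main_key _ _
        (by simp only [List.length_append, List.length_replicate]; omega)
        (by intro h; rw [h] at hA1; simp at hA1))
  · simp only [if_neg h1]
    have h1' : a.length ≤ b.length := by omega
    by_cases h2 : align = "right"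
    · simp only [if_pos h2]
      exact congrArg String.mk (main_key _ _
        (by simp only [List.length_append, List.length_replicate]; omega)
        (by intro h; rw [h] at hB1; simp at hB1))
    · simp only [if_neg h2]
      exact congrArg String.mk (main_key _ _
        (by simp only [List.length_append, List.length_replicate]; omega)
        (by intro h; rw [h] at hB1; simp at hB1))

-- ===== VERDICT (by name: the statement is the Claim_ definition above) =====
theorem b_nand_spec : Claim_equal_b_nand := by
  intro A B align _ hpre
  unfold Spec_b_nand
  exact b_nand_spec_aux A B align hpre.1 hpre.2.1
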